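-- pv_equiv track=rewrite | github.com/pisterlabs/promptset | data/scraping/repos/coveo-labs~creating-demo-catalog/scripts~1_generateAllVariationsAndDallE.py | doWeHaveVariants
-- ===== SOURCE A (Python) =====
-- import copy
--
-- def removeSpecialFieldsFromKey(metadata):
--   meta = copy.deepcopy(metadata)
--   return meta
--
-- def doWeHaveVariants(metadata, variant_fields):
--   variants = False
--   meta = removeSpecialFieldsFromKey(metadata)
--   for key in meta.keys():
--     if key in variant_fields:
--       if (meta[key] != ''):
--         variants = True
--
--   return variants
-- ===== SOURCE B (Python) =====
-- def doWeHaveVariants(metadata, variant_fields):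
--   return any(f in metadata and metadata[f] != '' for f in variant_fields)
-- ===== Notes on version B (the rewrite author's own statement) =====
-- stated objective: idiomatic
-- what changed: Dropped the no-op deepcopy helper and replaced the loop over metadata's keys (with a list-membership test per key) by a single any() over variant_fields probing the dict by membership/lookup, reversing which collection is scanned and which is probed.
import Mathlib
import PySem

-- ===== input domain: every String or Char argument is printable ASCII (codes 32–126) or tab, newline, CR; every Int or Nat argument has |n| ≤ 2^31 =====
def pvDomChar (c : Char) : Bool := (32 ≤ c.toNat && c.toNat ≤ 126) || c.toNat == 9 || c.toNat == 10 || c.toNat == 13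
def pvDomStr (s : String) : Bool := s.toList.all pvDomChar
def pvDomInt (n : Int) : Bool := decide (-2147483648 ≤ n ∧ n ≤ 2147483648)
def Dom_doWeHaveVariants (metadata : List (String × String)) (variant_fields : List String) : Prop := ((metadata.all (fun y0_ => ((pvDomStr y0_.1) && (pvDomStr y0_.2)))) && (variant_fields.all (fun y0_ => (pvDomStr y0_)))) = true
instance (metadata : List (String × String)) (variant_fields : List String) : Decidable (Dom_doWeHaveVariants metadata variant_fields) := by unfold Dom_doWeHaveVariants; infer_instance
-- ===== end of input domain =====

-- B drops the no-op deepcopy helper and iterates over variant_fields probing the dict, instead of iterating the dict's keys probing the list (idiomatic).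
-- ===== PORT A =====
-- copy.deepcopy returns an equal dict; on an association list this is the identity
def removeSpecialFieldsFromKey (metadata : List (String × String)) : List (String × String) :=
  metadata

def doWeHaveVariants (metadata : List (String × String)) (variant_fields : List String) : Bool :=
  let m := removeSpecialFieldsFromKey metadata
  (PySem.Dict.mk m).keys.foldl (fun variants key =>
    if variant_fields.contains key then
      if (PySem.Dict.mk m).getD key "" != "" then true else variants
    else variants) false

-- ===== PORT B =====
def doWeHaveVariants_alt (metadata : List (String × String)) (variant_fields : List String) : Bool :=
  variant_fields.any (fun f =>
    (PySem.Dict.mk metadata).contains f && (PySem.Dict.mk metadata).getD f "" != "")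

-- ===== PRECONDITION & SPEC =====
def Spec_doWeHaveVariants (metadata : List (String × String)) (variant_fields : List String) (out : Bool) : Prop := out = doWeHaveVariants_alt metadata variant_fields
instance (metadata : List (String × String)) (variant_fields : List String) (out : Bool) : Decidable (Spec_doWeHaveVariants metadata variant_fields out) := by unfold Spec_doWeHaveVariants; infer_instance

-- ===== CLAIM (what is proved, stated in full; the proofs are below) =====
def Claim_equal_doWeHaveVariants : Prop := ∀ (metadata : List (String × String)) (variant_fields : List String), Dom_doWeHaveVariants metadata variant_fields → Spec_doWeHaveVariants metadata variant_fields (doWeHaveVariants metadata variant_fields)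

-- ===== LEMMAS AND PROOFS =====

-- ===== VERDICT (by name: the statement is the Claim_ definition above) =====
-- the accumulated loop over keys is an OR of the two tests over the keys
lemma foldA (c1 c2 : String → Bool) :
    ∀ (l : List String) (b : Bool),
      l.foldl (fun variants key => if c1 key then (if c2 key then true else variants) else variants) b
        = (b || l.any (fun k => c1 k && c2 k)) := by
  intro l
  induction l with
  | nil => intro b; simp
  | cons x xs ih =>
      intro b
      rw [List.foldl_cons, ih, List.any_cons]
      cases h1 : c1 x <;> cases h2 : c2 x <;> simp_all [Bool.or_assoc]

theorem doWeHaveVariants_spec : Claim_equal_doWeHaveVariants := by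
  intro metadata variant_fields _
  unfold Spec_doWeHaveVariants doWeHaveVariants doWeHaveVariants_alt removeSpecialFieldsFromKey
  rw [foldA (fun k => variant_fields.contains k) (fun k => (PySem.Dict.mk metadata).getD k "" != ""),
     Bool.false_or, Bool.eq_iff_iff]
  simp only [List.any_eq_true, Bool.and_eq_true, List.contains_iff_mem,
    PySem.Dict.contains_eq_decide_mem_keys, decide_eq_true_eq]
  constructor
  · rintro ⟨k, hk, hv, hne⟩; exact ⟨k, hv, hk, hne⟩
  · rintro ⟨k, hv, hk, hne⟩; exact ⟨k, hk, hv, hne⟩
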